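-- pv_equiv track=rewrite | github.com/J300-0/minor | formatter/normalizer/cleaner.py | _remove_repeated_table_captions
-- ===== SOURCE A (Python) =====
-- def _remove_repeated_table_captions(text: str, table_captions: list) -> str:
--     """
--     Remove table caption text that leaked into body text.
--
--     Table captions like 'Real world regression datasets, RMSE reported...'
--     sometimes appear in section bodies because pdfplumber packs captions
--     into the same text block as body paragraphs.
--     """
--     if not text or not table_captions:
--         return text
--
--     for caption in table_captions:
--         if not caption or len(caption) < 20:
--             continue
--         # Use the first 40 chars of caption as search pattern
--         search = caption[:min(40, len(caption))].strip()
--         if search in text: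
--             # Remove lines containing this caption fragment
--             lines = text.split("\n")
--             lines = [l for l in lines if search not in l]
--             text = "\n".join(lines)
--
--     return text
-- ===== SOURCE B (Python) =====
-- def _remove_repeated_table_captions(text: str, table_captions: list) -> str:
--     # Split once, filter each line against all caption fragments, join once.
--     frags = [c[:40].strip() for c in table_captions if c and len(c) >= 20]
--     if not frags:
--         return text
--     return "\n".join(l for l in text.split("\n")
--                      if not any(f in l for f in frags))
-- ===== Notes on version B (the rewrite author's own statement) =====
-- stated objective: simpler
-- what changed: A loops over captions and, per matching caption, re-splits, re-filters and re-joins the evolving text; B precomputes the fragment list once, splits the text once, keeps each line that contains no fragment, and joins once.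
import Mathlib
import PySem

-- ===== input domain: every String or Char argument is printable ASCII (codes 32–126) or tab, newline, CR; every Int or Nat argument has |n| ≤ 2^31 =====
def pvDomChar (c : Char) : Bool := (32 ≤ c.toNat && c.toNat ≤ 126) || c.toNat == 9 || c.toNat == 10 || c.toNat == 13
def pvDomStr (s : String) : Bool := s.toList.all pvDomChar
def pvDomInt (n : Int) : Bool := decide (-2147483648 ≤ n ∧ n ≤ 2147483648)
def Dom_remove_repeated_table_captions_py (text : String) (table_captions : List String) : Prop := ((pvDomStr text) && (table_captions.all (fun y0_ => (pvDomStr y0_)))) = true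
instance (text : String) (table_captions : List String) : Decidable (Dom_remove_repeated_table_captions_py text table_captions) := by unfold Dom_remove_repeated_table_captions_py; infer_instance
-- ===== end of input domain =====

-- B replaces A's per-caption split/filter/join cycles by one split, one filter of every
-- line against the precomputed fragment list, and one join.

-- ===== PORT A =====
-- loop body of A's "for caption in table_captions" (text is the loop state)
def pvStepA (text : String) (caption : String) : String :=
  if caption = "" ∨ PySem.Str.len caption < 20 then text
  else
    let search := PySem.Str.strip (PySem.Str.slice caption none (some (min 40 (PySem.Str.len caption))))
    if PySem.Str.isIn search text then
      PySem.Str.join "\n" (((PySem.Str.split? text "\n").getD []).filter (fun l => !(PySem.Str.isIn search l)))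
    else text

def remove_repeated_table_captions_py (text : String) (table_captions : List String) : String :=
  if text = "" ∨ table_captions = [] then text
  else table_captions.foldl pvStepA text

-- ===== PORT B =====
def remove_repeated_table_captions_py_alt (text : String) (table_captions : List String) : String :=
  let frags := table_captions.filterMap (fun c =>
    if c ≠ "" ∧ 20 ≤ PySem.Str.len c then some (PySem.Str.strip (PySem.Str.slice c none (some 40))) else none)
  if frags = [] then text
  else PySem.Str.join "\n" (((PySem.Str.split? text "\n").getD []).filter
    (fun l => !(frags.any (fun f => PySem.Str.isIn f l))))

-- ===== PRECONDITION & SPEC =====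
def Spec_remove_repeated_table_captions_py (text : String) (table_captions : List String) (out : String) : Prop := out = remove_repeated_table_captions_py_alt text table_captions
instance (text : String) (table_captions : List String) (out : String) : Decidable (Spec_remove_repeated_table_captions_py text table_captions out) := by unfold Spec_remove_repeated_table_captions_py; infer_instance

-- ===== CLAIM (what is proved, stated in full; the proofs are below) =====
def Claim_equal_remove_repeated_table_captions_py : Prop := ∀ (text : String) (table_captions : List String), Dom_remove_repeated_table_captions_py text table_captions → Spec_remove_repeated_table_captions_py text table_captions (remove_repeated_table_captions_py text table_captions)

-- ===== LEMMAS AND PROOFS =====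

def pvSplitNl : List Char → List (List Char)
  | [] => [[]]
  | c :: rest => if c = '\n' then [] :: pvSplitNl rest else (pvSplitNl rest).modifyHead (c :: ·)

theorem pvGo_spec (fuel : Nat) (l cur : List Char) (acc : List (List Char))
    (h : l.length < fuel) :
    PySem.Chars.splitOn.go ['\n'] fuel l cur acc
      = acc.reverse ++ (pvSplitNl l).modifyHead (cur.reverse ++ ·) := by
  induction fuel generalizing l cur acc with
  | zero => omega
  | succ n ih =>
    cases l with
    | nil => simp [PySem.Chars.splitOn.go, pvSplitNl]
    | cons c rest =>
      by_cases hc : c = '\n'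
      · subst hc
        rw [PySem.Chars.splitOn.go]
        simp only [List.isPrefixOf, Bool.and_true, beq_self_eq_true, if_pos]
        simp only [List.length_cons, List.drop_succ_cons, List.length_nil, List.drop_zero]
        rw [ih rest [] (cur.reverse :: acc) (by simp at h; omega)]
        simp [pvSplitNl]
        cases pvSplitNl rest <;> simp
      · rw [PySem.Chars.splitOn.go]
        have hp : List.isPrefixOf ['\n'] (c :: rest) = false := by
          simp [List.isPrefixOf]; exact fun hcc => absurd hcc.symm hc
        rw [if_neg (by simp [hp])]
        rw [ih rest (c :: cur) acc (by simp at h; omega)]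
        simp [pvSplitNl, hc]
        cases hs : pvSplitNl rest <;> simp

theorem pvSplitNl_ne_nil (s : List Char) : pvSplitNl s ≠ [] := by
  induction s with
  | nil => simp [pvSplitNl]
  | cons c rest ih =>
    simp only [pvSplitNl]
    split_ifs
    · simp
    · cases hs : pvSplitNl rest with
      | nil => exact absurd hs ih
      | cons q qs => simp

theorem pvSplitOn_eq (s : List Char) :
    PySem.Chars.splitOn s ['\n'] = pvSplitNl s := by
  rw [PySem.Chars.splitOn, pvGo_spec _ _ _ _ (by omega)]
  simp
  cases pvSplitNl s <;> simp

theorem pvIntercalate_cons (x : List Char) (y : List Char) (l : List (List Char)) :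
    List.intercalate ['\n'] (x :: y :: l) = x ++ '\n' :: List.intercalate ['\n'] (y :: l) := by
  simp [List.intercalate, List.intersperse]

theorem pvIntercalate_singleton (x : List Char) : List.intercalate ['\n'] [x] = x := by
  simp [List.intercalate, List.intersperse]

theorem pvJoin_splitNl (s : List Char) : List.intercalate ['\n'] (pvSplitNl s) = s := by
  induction s with
  | nil => simp [pvSplitNl, List.intercalate]
  | cons c rest ih =>
    simp only [pvSplitNl]
    split_ifs with hc
    · subst hc
      cases hs : pvSplitNl rest with
      | nil => exact absurd hs (pvSplitNl_ne_nil rest)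
      | cons q qs => rw [pvIntercalate_cons, ← hs, ih]; simp
    · cases hs : pvSplitNl rest with
      | nil => exact absurd hs (pvSplitNl_ne_nil rest)
      | cons q qs =>
        rw [hs] at ih
        cases qs with
        | nil => simpa [List.intercalate] using congrArg (c :: ·) (by simpa [List.intercalate] using ih)
        | cons q2 qs2 =>
          simp only [List.modifyHead]
          rw [pvIntercalate_cons] at ih ⊢
          simp [← ih]

theorem pvSplitNl_append (p l : List Char) (hp : '\n' ∉ p) :
    pvSplitNl (p ++ l) = (pvSplitNl l).modifyHead (p ++ ·) := by
  induction p with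
  | nil => simp only [List.nil_append]; cases h : pvSplitNl l <;> simp [h]
  | cons c cs ih =>
    simp only [List.cons_append, pvSplitNl]
    rw [if_neg (by simp at hp; exact fun hh => hp.1 hh.symm)]
    rw [ih (by simp at hp; exact hp.2)]
    cases pvSplitNl l <;> simp

theorem pvSplitNl_join (parts : List (List Char)) (hne : parts ≠ [])
    (hnl : ∀ p ∈ parts, '\n' ∉ p) :
    pvSplitNl (List.intercalate ['\n'] parts) = parts := by
  induction parts with
  | nil => exact absurd rfl hne
  | cons p ps ih =>
    cases ps with
    | nil =>
      simp only [pvIntercalate_singleton]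
      rw [show p = p ++ ([] : List Char) by simp, pvSplitNl_append p [] (hnl p (by simp))]
      simp [pvSplitNl]
    | cons q qs =>
      rw [pvIntercalate_cons, pvSplitNl_append p _ (hnl p (by simp))]
      have : pvSplitNl ('\n' :: List.intercalate ['\n'] (q :: qs)) = [] :: pvSplitNl (List.intercalate ['\n'] (q :: qs)) := by
        simp [pvSplitNl]
      rw [this, ih (by simp) (fun x hx => hnl x (by simp [hx]))]
      simp

theorem pvMem_splitNl_no_nl (s l : List Char) (h : l ∈ pvSplitNl s) : '\n' ∉ l := by
  induction s generalizing l with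
  | nil => simp [pvSplitNl] at h; simp [h]
  | cons c rest ih =>
    simp only [pvSplitNl] at h
    split_ifs at h with hc
    · rcases List.mem_cons.mp h with h | h
      · simp [h]
      · exact ih l h
    · cases hs : pvSplitNl rest with
      | nil => exact absurd hs (pvSplitNl_ne_nil rest)
      | cons q qs =>
        rw [hs] at h
        simp only [List.modifyHead] at h
        rcases List.mem_cons.mp h with h | h
        · subst h
          intro hm
          rcases List.mem_cons.mp hm with hm | hm
          · exact hc hm.symm
          · exact ih q (by simp [hs]) hm
        · exact ih l (by simp [hs, h])

theorem pvMem_infix_intercalate (p : List Char) (parts : List (List Char)) (h : p ∈ parts) :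
    p <:+: List.intercalate ['\n'] parts := by
  induction parts with
  | nil => simp at h
  | cons q qs ih =>
    cases qs with
    | nil =>
      simp at h
      simp [h, pvIntercalate_singleton]
    | cons r rs =>
      rw [pvIntercalate_cons]
      rcases List.mem_cons.mp h with h | h
      · subst h; exact (List.prefix_append p _).isInfix
      · exact (ih h).trans ⟨q ++ ['\n'], [], by simp⟩

def pvFragsC (caps : List String) : List (List Char) :=
  caps.filterMap (fun c =>
    if c.toList = [] ∨ (c.toList.length : Int) < 20 then none
    else some (PySem.Chars.strip (List.take 40 c.toList)))

def pvK (fs : List (List Char)) (l : List Char) : Bool :=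
  fs.all (fun f => !(PySem.Chars.isIn f l))

theorem pvEmpty_iff (c : String) : c = "" ↔ c.toList = [] := by
  constructor
  · intro h; simp [h]
  · intro h; exact String.toList_inj.mp (by simp [h])

theorem pvTake_min (t : List Char) : List.take (min 40 t.length) t = List.take 40 t := by
  rcases Nat.lt_or_ge 40 t.length with h | h
  · rw [Nat.min_eq_left (by omega)]
  · rw [Nat.min_eq_right h, List.take_length, List.take_of_length_le h]

theorem pvSearchA_toList (c : String) (h : ¬(c = "" ∨ PySem.Str.len c < 20)) :
    (PySem.Str.strip (PySem.Str.slice c none (some (min 40 (PySem.Str.len c))))).toList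
      = PySem.Chars.strip (List.take 40 c.toList) := by
  rw [PySem.Str.toList_strip, PySem.Str.toList_slice]
  congr 1
  rw [PySem.Str.len_eq]
  simp only [PySem.Chars.slice_eq_listSlice]
  rw [PySem.List.slice_to c.toList (show (0:Int) ≤ min 40 (c.toList.length:Int) by positivity)]
  rw [show (min (40:Int) (c.toList.length:Int)).toNat = min 40 c.toList.length by omega]
  exact pvTake_min c.toList

theorem pvSearchB_toList (c : String) :
    (PySem.Str.strip (PySem.Str.slice c none (some 40))).toList
      = PySem.Chars.strip (List.take 40 c.toList) := by
  rw [PySem.Str.toList_strip, PySem.Str.toList_slice]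
  congr 1
  simp only [PySem.Chars.slice_eq_listSlice]
  rw [PySem.List.slice_to c.toList (show (0:Int) ≤ (40:Int) by norm_num)]
  rfl

theorem pvSplit_toList (t : String) :
    ∃ ls, PySem.Str.split? t "\n" = some ls ∧ ls.map String.toList = pvSplitNl t.toList := by
  have h := PySem.Str.split?_map t "\n"
  rw [show ("\n" : String).toList = ['\n'] by rfl] at h
  rw [PySem.Chars.split?] at h
  simp only [List.isEmpty_cons, if_neg] at h
  rw [pvSplitOn_eq] at h
  cases hs : PySem.Str.split? t "\n" with
  | none => rw [hs] at h; simp at h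
  | some ls => rw [hs] at h; simp at h; exact ⟨ls, rfl, h⟩

theorem pvFilterJoin_toList (t : String) (search : String) :
    (PySem.Str.join "\n" (((PySem.Str.split? t "\n").getD []).filter
        (fun l => !(PySem.Str.isIn search l)))).toList
      = List.intercalate ['\n'] ((pvSplitNl t.toList).filter
        (fun l => !(PySem.Chars.isIn search.toList l))) := by
  obtain ⟨ls, hs, hmap⟩ := pvSplit_toList t
  rw [hs]
  rw [PySem.Str.toList_join]
  simp only [show ("\n":String).toList = ['\n'] from rfl,
    show PySem.Chars.join ['\n'] = List.intercalate ['\n'] from rfl, Option.getD_some]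
  congr 1
  rw [← hmap, List.filter_map]
  congr 1

theorem pvK_append (fs : List (List Char)) (s l : List Char) :
    pvK (fs ++ [s]) l = (pvK fs l && !(PySem.Chars.isIn s l)) := by
  simp [pvK, List.all_append]

theorem pvStep_advance (lines0 : List (List Char)) (hnl : ∀ l ∈ lines0, '\n' ∉ l)
    (fs : List (List Char)) (t : String)
    (ht : t.toList = List.intercalate ['\n'] (lines0.filter (pvK fs)))
    (sC : List Char) (search : String) (hsearch : search.toList = sC)
    (out : String)
    (hout : out = if PySem.Str.isIn search t then
      PySem.Str.join "\n" (((PySem.Str.split? t "\n").getD []).filter (fun l => !(PySem.Str.isIn search l)))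
    else t) :
    out.toList = List.intercalate ['\n'] (lines0.filter (pvK (fs ++ [sC]))) := by
  have hff : lines0.filter (pvK (fs ++ [sC]))
      = (lines0.filter (pvK fs)).filter (fun l => !(PySem.Chars.isIn sC l)) := by
    rw [List.filter_filter]
    apply List.filter_congr
    intro l _
    simp [pvK_append, Bool.and_comm]
  by_cases hin : PySem.Str.isIn search t = true
  · rw [hout, if_pos hin, pvFilterJoin_toList, hsearch, ht, hff]
    cases hfe : lines0.filter (pvK fs) with
    | nil =>
      simp only [show List.intercalate ['\n'] ([] : List (List Char)) = [] from rfl,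
        List.filter_nil, show pvSplitNl ([] : List Char) = [[]] from rfl]
      by_cases he : PySem.Chars.isIn sC [] = true
      · simp [he, List.intercalate]
      · simp only [List.filter_cons, he]
        simp [pvIntercalate_singleton]
    | cons q qs =>
      rw [← hfe, pvSplitNl_join _ (by rw [hfe]; simp)
        (fun p hp => hnl p (List.mem_of_mem_filter hp))]
  · have hnotin : ∀ l ∈ lines0.filter (pvK fs), PySem.Chars.isIn sC l = false := by
      intro l hl
      by_contra hcon
      have h1 : sC <:+: l := (PySem.Chars.isIn_iff_infix sC l).mp (by
        revert hcon; cases PySem.Chars.isIn sC l <;> simp)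
      have h2 : l <:+: t.toList := ht ▸ pvMem_infix_intercalate l _ hl
      have : PySem.Str.isIn search t = true := by
        rw [PySem.Str.isIn_eq, PySem.Chars.isIn_iff_infix, hsearch]
        exact h1.trans h2
      exact hin this
    have hid : List.filter (fun l => !PySem.Chars.isIn sC l) (List.filter (pvK fs) lines0)
        = List.filter (pvK fs) lines0 :=
      List.filter_eq_self.mpr (fun l hl => by simp [hnotin l hl])
    rw [hout, if_neg hin, ht, hff, hid]

theorem pvFoldA_eq (caps : List String) (fs : List (List Char)) (lines0 : List (List Char))
    (hnl : ∀ l ∈ lines0, '\n' ∉ l) (t : String)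
    (ht : t.toList = List.intercalate ['\n'] (lines0.filter (pvK fs))) :
    (caps.foldl pvStepA t).toList
      = List.intercalate ['\n'] (lines0.filter (pvK (fs ++ pvFragsC caps))) := by
  induction caps generalizing fs t with
  | nil => simpa [pvFragsC] using ht
  | cons c cs ih =>
    rw [List.foldl_cons]
    by_cases hskip : c = "" ∨ PySem.Str.len c < 20
    · have hstep : pvStepA t c = t := by rw [pvStepA, if_pos hskip]
      have hfrag : pvFragsC (c :: cs) = pvFragsC cs := by
        have hc : c.toList = [] ∨ ((c.toList.length : Int) < 20) := by
          rcases hskip with h | h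
          · exact Or.inl ((pvEmpty_iff c).mp h)
          · right; rwa [PySem.Str.len_eq] at h
        simp only [pvFragsC, List.filterMap_cons, if_pos hc]
      rw [hstep, hfrag, ih fs t ht]
    · have hcond : ¬(c.toList = [] ∨ (c.toList.length : Int) < 20) := by
        push_neg at hskip ⊢
        exact ⟨fun h => hskip.1 ((pvEmpty_iff c).mpr h), by
          have := hskip.2; rw [PySem.Str.len_eq] at this; exact this⟩
      have hfrag : pvFragsC (c :: cs)
          = PySem.Chars.strip (List.take 40 c.toList) :: pvFragsC cs := by
        simp only [pvFragsC, List.filterMap_cons, if_neg hcond]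
      set search := PySem.Str.strip (PySem.Str.slice c none (some (min 40 (PySem.Str.len c)))) with hsearchdef
      have hstep : pvStepA t c = if PySem.Str.isIn search t then
          PySem.Str.join "\n" (((PySem.Str.split? t "\n").getD []).filter
            (fun l => !(PySem.Str.isIn search l)))
        else t := by rw [pvStepA, if_neg hskip]
      have hnext := pvStep_advance lines0 hnl fs t ht
        (PySem.Chars.strip (List.take 40 c.toList)) search (pvSearchA_toList c hskip)
        (pvStepA t c) hstep
      rw [ih (fs ++ [PySem.Chars.strip (List.take 40 c.toList)]) (pvStepA t c) hnext, hfrag]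
      simp

theorem pvJoinFilter_toList (t : String) (pS : String → Bool) (p : List Char → Bool)
    (hp : ∀ l : String, pS l = p l.toList) :
    (PySem.Str.join "\n" (((PySem.Str.split? t "\n").getD []).filter pS)).toList
      = List.intercalate ['\n'] ((pvSplitNl t.toList).filter p) := by
  obtain ⟨ls, hs, hmap⟩ := pvSplit_toList t
  rw [hs]
  rw [PySem.Str.toList_join]
  simp only [show ("\n":String).toList = ['\n'] from rfl,
    show PySem.Chars.join ['\n'] = List.intercalate ['\n'] from rfl, Option.getD_some]
  congr 1
  rw [← hmap, List.filter_map]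
  congr 1
  apply List.filter_congr
  intro l _
  exact hp l

theorem pvK_eq_not_any (fs : List (List Char)) (l : List Char) :
    pvK fs l = !(fs.any (fun f => PySem.Chars.isIn f l)) := by
  induction fs with
  | nil => simp [pvK]
  | cons f fs ih => simp [pvK, List.all_cons, List.any_cons] at ih ⊢; simp [ih]

theorem pvFragsB_map (caps : List String) :
    (caps.filterMap (fun c =>
      if c ≠ "" ∧ 20 ≤ PySem.Str.len c then some (PySem.Str.strip (PySem.Str.slice c none (some 40))) else none)).map String.toList
      = pvFragsC caps := by
  rw [pvFragsC, List.map_filterMap]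
  apply List.filterMap_congr
  intro c _
  by_cases h : c.toList = [] ∨ ((c.toList.length : Int) < 20)
  · rw [if_pos h, if_neg, Option.map_none]
    rintro ⟨h1, h2⟩
    rcases h with h | h
    · exact h1 ((pvEmpty_iff c).mpr h)
    · rw [PySem.Str.len_eq] at h2; omega
  · rw [if_neg h, if_pos, Option.map_some, pvSearchB_toList]
    constructor
    · intro he; exact h (Or.inl ((pvEmpty_iff c).mp he))
    · rw [PySem.Str.len_eq]
      rcases Int.lt_or_le (c.toList.length : Int) 20 with hh | hh
      · exact absurd (Or.inr hh) h
      · exact hh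

theorem pv_main : ∀ (text : String) (table_captions : List String),
    remove_repeated_table_captions_py text table_captions
      = remove_repeated_table_captions_py_alt text table_captions := by
  intro text caps
  rw [remove_repeated_table_captions_py, remove_repeated_table_captions_py_alt]
  set fragsB := caps.filterMap (fun c =>
    if c ≠ "" ∧ 20 ≤ PySem.Str.len c then some (PySem.Str.strip (PySem.Str.slice c none (some 40))) else none) with hfragsB
  have hmapf : fragsB.map String.toList = pvFragsC caps := pvFragsB_map caps
  have hBpred : ∀ l : String, (!(fragsB.any (fun f => PySem.Str.isIn f l)))
      = pvK (pvFragsC caps) l.toList := by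
    intro l
    rw [pvK_eq_not_any, ← hmapf, List.any_map]
    congr 1
  by_cases hcaps : caps = []
  · subst hcaps
    rw [if_pos (Or.inr rfl), if_pos (show fragsB = [] by rw [hfragsB]; rfl)]
  · by_cases htext : text = ""
    · rw [if_pos (Or.inl htext)]
      by_cases hfe : fragsB = []
      · rw [if_pos hfe]
      · rw [if_neg hfe]
        apply String.toList_inj.mp
        rw [pvJoinFilter_toList _ _ (pvK (pvFragsC caps)) hBpred]
        rw [htext]
        rw [show ("" : String).toList = [] from rfl]
        rw [show pvSplitNl ([] : List Char) = [[]] from rfl]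
        by_cases hK : pvK (pvFragsC caps) [] = true
        · simp only [List.filter_cons, hK, if_true, List.filter_nil, pvIntercalate_singleton]
        · simp only [List.filter_cons, hK, if_false, List.filter_nil]
          rfl
    · rw [if_neg (by rintro (h | h); exact htext h; exact hcaps h)]
      have hnl : ∀ l ∈ pvSplitNl text.toList, '\n' ∉ l := fun l hl => pvMem_splitNl_no_nl _ l hl
      have ht0 : text.toList = List.intercalate ['\n'] ((pvSplitNl text.toList).filter (pvK [])) := by
        rw [List.filter_eq_self.mpr (fun l _ => by simp [pvK]), pvJoin_splitNl]
      have hA := pvFoldA_eq caps [] (pvSplitNl text.toList) hnl text ht0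
      simp only [List.nil_append] at hA
      by_cases hfe : fragsB = []
      · rw [if_pos hfe]
        have : pvFragsC caps = [] := by rw [← hmapf, hfe]; rfl
        apply String.toList_inj.mp
        rw [hA, this]
        rw [List.filter_eq_self.mpr (fun l _ => by simp [pvK]), pvJoin_splitNl]
      · rw [if_neg hfe]
        apply String.toList_inj.mp
        rw [hA, pvJoinFilter_toList _ _ (pvK (pvFragsC caps)) hBpred]

-- ===== VERDICT (by name: the statement is the Claim_ definition above) =====
theorem remove_repeated_table_captions_py_spec : Claim_equal_remove_repeated_table_captions_py := by
  unfold Claim_equal_remove_repeated_table_captions_py Spec_remove_repeated_table_captions_py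
  intro text table_captions _
  exact pv_main text table_captions
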